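-- pv_equiv track=rewrite | github.com/timoast/sinto | sinto/filterbarcodes.py | merge_thread_output
-- ===== SOURCE A (Python) =====
-- def merge_thread_output(data):
--     """
--     merge multiple dictionaries of the same format into one
--     """
--     out = {}
--     for d in data:
--         for cell, counts in d.items():
--             try:
--                 out[cell]
--             except KeyError:
--                 out[cell] = counts
--             else:
--                 out[cell] = [sum(x) for x in zip(counts, out[cell])]
--     return out
-- ===== SOURCE B (Python) =====
-- def merge_thread_output(data):
--     """
--     merge multiple dictionaries of the same format into one
--     """
--     groups = {}
--     for d in data:
--         for cell, counts in d.items():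
--             groups.setdefault(cell, []).append(counts)
--     return {cell: [sum(x) for x in zip(*lists)] for cell, lists in groups.items()}
-- ===== Notes on version B (the rewrite author's own statement) =====
-- stated objective: alternative
-- what changed: Replaces A's one-pass running-accumulator merge (re-zip-summing on every repeated key) with a gather-then-reduce: one pass grouping each cell's count-lists, then one pass summing each group columnwise via zip(*lists).
import Mathlib
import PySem

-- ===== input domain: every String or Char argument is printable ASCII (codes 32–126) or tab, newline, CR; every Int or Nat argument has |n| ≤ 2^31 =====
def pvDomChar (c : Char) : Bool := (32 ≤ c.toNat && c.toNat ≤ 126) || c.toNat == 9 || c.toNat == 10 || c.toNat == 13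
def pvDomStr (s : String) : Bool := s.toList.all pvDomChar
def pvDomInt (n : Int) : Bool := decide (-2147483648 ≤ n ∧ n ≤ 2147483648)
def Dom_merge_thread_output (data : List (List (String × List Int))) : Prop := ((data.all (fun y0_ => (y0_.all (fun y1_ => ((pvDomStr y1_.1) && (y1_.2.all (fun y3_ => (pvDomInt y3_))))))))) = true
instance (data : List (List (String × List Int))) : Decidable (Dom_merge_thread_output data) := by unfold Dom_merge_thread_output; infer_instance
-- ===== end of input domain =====

-- B replaces A's running-accumulator merge by a gather-then-reduce over per-cell buckets (same cost, different decomposition); equivalence of return values is proved below.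


-- ===== PORT A =====
-- Python-dict primitives on association lists (exact for unique keys: first-match
-- lookup; assignment overwrites in place, new keys append at the end).
def dGet? {ν : Type} : List (String × ν) → String → Option ν
  | [], _ => none
  | p :: rest, k => if p.1 = k then some p.2 else dGet? rest k

def dSet {ν : Type} : List (String × ν) → String → ν → List (String × ν)
  | [], k, v => [(k, v)]
  | p :: rest, k, v => if p.1 = k then (k, v) :: rest else p :: dSet rest k v

def merge_thread_output (data : List (List (String × List Int))) : List (String × List Int) :=
  data.foldl (fun out d =>
    d.foldl (fun out p =>
      match dGet? out p.1 with
      | none => dSet out p.1 p.2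
      | some old => dSet out p.1 ((p.2.zip old).map (fun x => x.1 + x.2))) out) []

-- ===== PORT B =====
-- zip(*lists): columnwise tuples, truncated to the shortest list.
def zipStar : List (List Int) → List (List Int)
  | [] => []
  | [l] => l.map (fun x => [x])
  | l :: m :: rest => (l.zip (zipStar (m :: rest))).map (fun x => x.1 :: x.2)

def merge_thread_output_alt (data : List (List (String × List Int))) : List (String × List Int) :=
  (data.foldl (fun g d =>
    d.foldl (fun g p =>
      match dGet? g p.1 with
      | none => dSet g p.1 [p.2]
      | some ls => dSet g p.1 (ls ++ [p.2])) g) []).map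
    (fun q => (q.1, (zipStar q.2).map (fun t => t.foldl (· + ·) 0)))

-- ===== PRECONDITION & SPEC =====
-- Pre_ excludes inputs in which some inner association list has duplicate keys:
-- such a value does not represent a Python dict (A's argument is a list of dicts),
-- so no Python behaviour of A is defined on it.
def Pre_merge_thread_output (data : List (List (String × List Int))) : Prop :=
  ∀ d ∈ data, (d.map Prod.fst).Nodup
instance (data : List (List (String × List Int))) : Decidable (Pre_merge_thread_output data) := by
  unfold Pre_merge_thread_output; infer_instance

def pvWitness_merge_thread_output : (List (List (String × List Int))) :=
  [[("a", [1, 2])], [("a", [3, 4]), ("b", [5])]]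

def Spec_merge_thread_output (data : List (List (String × List Int))) (out : List (String × List Int)) : Prop := out = merge_thread_output_alt data
instance (data : List (List (String × List Int))) (out : List (String × List Int)) : Decidable (Spec_merge_thread_output data out) := by unfold Spec_merge_thread_output; infer_instance

-- ===== CLAIM (what is proved, stated in full; the proofs are below) =====
def Claim_equal_merge_thread_output : Prop := ∀ (data : List (List (String × List Int))), Dom_merge_thread_output data → Pre_merge_thread_output data → Spec_merge_thread_output data (merge_thread_output data)

-- ===== LEMMAS AND PROOFS =====

-- elementwise zip-sum of two lists (the merge A performs on a repeated key)
def mop (a b : List Int) : List Int := (a.zip b).map (fun x => x.1 + x.2)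

-- A's per-cell accumulator after seeing the bucket h :: t
def redL : List (List Int) → List Int
  | [] => []
  | h :: t => t.foldl (fun acc l => mop l acc) h

-- B's per-cell reduction
def colSum (ls : List (List Int)) : List Int :=
  (zipStar ls).map (fun t => t.foldl (· + ·) 0)

theorem mop_comm (a b : List Int) : mop a b = mop b a := by
  apply List.ext_getElem
  · simp [mop, Nat.min_comm]
  · intro i h1 h2
    simp [mop]
    ring

theorem mop_assoc (a b c : List Int) : mop (mop a b) c = mop a (mop b c) := by
  apply List.ext_getElem
  · simp only [mop, List.length_map, List.length_zip]
    omega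
  · intro i h1 h2
    simp [mop]
    ring

theorem foldl_add_shift : ∀ (t : List Int) (a : Int), t.foldl (· + ·) a = a + t.foldl (· + ·) 0
  | [], a => by simp
  | x :: t, a => by
    simp only [List.foldl_cons]
    rw [foldl_add_shift t (a + x), foldl_add_shift t (0 + x)]
    ring

theorem colSum_single (l : List Int) : colSum [l] = l := by
  simp [colSum, zipStar, List.map_map, Function.comp_def, List.foldl_cons, List.foldl_nil]

theorem colSum_cons (l : List Int) (ls : List (List Int)) (h : ls ≠ []) :
    colSum (l :: ls) = mop l (colSum ls) := by
  obtain ⟨m, rest, rfl⟩ := List.exists_cons_of_ne_nil h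
  simp only [colSum, zipStar, mop, List.map_map, List.zip_map_right]
  apply List.map_congr_left
  intro x _
  show (x.1 :: x.2).foldl (· + ·) 0 = x.1 + x.2.foldl (· + ·) 0
  simp only [List.foldl_cons, zero_add]
  exact foldl_add_shift x.2 x.1

theorem colSum_mop_cons (l h : List Int) (rest : List (List Int)) :
    colSum (mop l h :: rest) = colSum (h :: l :: rest) := by
  cases rest with
  | nil =>
      rw [colSum_single, colSum_cons h [l] (by simp), colSum_single, mop_comm]
  | cons r rs =>
      rw [colSum_cons (mop l h) (r :: rs) (by simp), colSum_cons h (l :: r :: rs) (by simp),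
          colSum_cons l (r :: rs) (by simp)]
      calc mop (mop l h) (colSum (r :: rs))
          = mop (mop h l) (colSum (r :: rs)) := by rw [mop_comm l h]
        _ = mop h (mop l (colSum (r :: rs))) := mop_assoc _ _ _

theorem foldl_mop : ∀ (t : List (List Int)) (h : List Int),
    t.foldl (fun acc l => mop l acc) h = colSum (h :: t)
  | [], h => (colSum_single h).symm
  | l :: t, h => by
    simp only [List.foldl_cons]
    rw [foldl_mop t (mop l h), colSum_mop_cons]

theorem redL_eq_colSum (ls : List (List Int)) (h : ls ≠ []) : redL ls = colSum ls := by
  obtain ⟨m, rest, rfl⟩ := List.exists_cons_of_ne_nil h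
  exact foldl_mop rest m

theorem dGet?_map {α β : Type} (g : α → β) (l : List (String × α)) (k : String) :
    dGet? (l.map (fun q => (q.1, g q.2))) k = (dGet? l k).map g := by
  induction l with
  | nil => rfl
  | cons p rest ih =>
      simp only [List.map_cons, dGet?]
      split <;> simp [ih]

theorem dSet_map {α β : Type} (g : α → β) (l : List (String × α)) (k : String) (v : α) :
    dSet (l.map (fun q => (q.1, g q.2))) k (g v) = (dSet l k v).map (fun q => (q.1, g q.2)) := by
  induction l with
  | nil => rfl
  | cons p rest ih =>
      simp only [List.map_cons, dSet]
      split <;> simp [ih]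

theorem dGet?_mem {α : Type} {l : List (String × α)} {k : String} {v : α}
    (h : dGet? l k = some v) : (k, v) ∈ l := by
  induction l with
  | nil => simp [dGet?] at h
  | cons p rest ih =>
      simp only [dGet?] at h
      split at h
      · rename_i hk
        cases h
        subst hk
        exact List.mem_cons.mpr (Or.inl rfl)
      · exact List.mem_cons_of_mem _ (ih h)

theorem mem_dSet {α : Type} {q : String × α} {l : List (String × α)} {k : String} {v : α}
    (h : q ∈ dSet l k v) : q = (k, v) ∨ q ∈ l := by
  induction l with
  | nil => simp [dSet] at h; simp [h]
  | cons p rest ih =>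
      simp only [dSet] at h
      split at h
      · rcases List.mem_cons.mp h with h' | h'
        · exact Or.inl h'
        · exact Or.inr (List.mem_cons_of_mem _ h')
      · rcases List.mem_cons.mp h with h' | h'
        · exact Or.inr (by simp [h'])
        · rcases ih h' with h'' | h''
          · exact Or.inl h''
          · exact Or.inr (List.mem_cons_of_mem _ h'')

-- the invariant tying A's accumulator to B's bucket dictionary
def InvP (g : List (String × List (List Int))) (out : List (String × List Int)) : Prop :=
  out = g.map (fun q => (q.1, redL q.2)) ∧ ∀ q ∈ g, q.2 ≠ []

theorem redL_append (h : List Int) (t : List (List Int)) (c : List Int) :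
    redL ((h :: t) ++ [c]) = mop c (redL (h :: t)) := by
  simp [redL, List.foldl_append]

theorem inner_step (g : List (String × List (List Int))) (out : List (String × List Int))
    (p : String × List Int) (hI : InvP g out) :
    InvP (match dGet? g p.1 with
          | none => dSet g p.1 [p.2]
          | some ls => dSet g p.1 (ls ++ [p.2]))
         (match dGet? out p.1 with
          | none => dSet out p.1 p.2
          | some old => dSet out p.1 ((p.2.zip old).map (fun x => x.1 + x.2))) := by
  obtain ⟨hmap, hne⟩ := hI
  subst hmap
  rw [dGet?_map]
  cases hg : dGet? g p.1 with
  | none =>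
      simp only [Option.map_none]
      constructor
      · exact dSet_map (fun ls => redL ls) g p.1 [p.2]
      · intro q hq
        rcases mem_dSet hq with h' | h'
        · simp [h']
        · exact hne q h'
  | some ls =>
      simp only [Option.map_some]
      have hlsne : ls ≠ [] := hne _ (dGet?_mem hg)
      obtain ⟨m, rest, rfl⟩ := List.exists_cons_of_ne_nil hlsne
      constructor
      · have hmerge : (p.2.zip (redL (m :: rest))).map (fun x => x.1 + x.2)
            = redL ((m :: rest) ++ [p.2]) := by
          rw [redL_append]; rfl
        rw [hmerge]
        exact dSet_map (fun ls => redL ls) g p.1 ((m :: rest) ++ [p.2])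
      · intro q hq
        rcases mem_dSet hq with h' | h'
        · simp [h']
        · exact hne q h'

theorem inner_fold (d : List (String × List Int)) :
    ∀ (g : List (String × List (List Int))) (out : List (String × List Int)), InvP g out →
    InvP (d.foldl (fun g p =>
            match dGet? g p.1 with
            | none => dSet g p.1 [p.2]
            | some ls => dSet g p.1 (ls ++ [p.2])) g)
         (d.foldl (fun out p =>
            match dGet? out p.1 with
            | none => dSet out p.1 p.2
            | some old => dSet out p.1 ((p.2.zip old).map (fun x => x.1 + x.2))) out) := by
  induction d with
  | nil => exact fun g out h => h
  | cons p d ih =>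
      intro g out h
      exact ih _ _ (inner_step g out p h)

theorem outer_fold (data : List (List (String × List Int))) :
    ∀ (g : List (String × List (List Int))) (out : List (String × List Int)), InvP g out →
    InvP (data.foldl (fun g d =>
            d.foldl (fun g p =>
              match dGet? g p.1 with
              | none => dSet g p.1 [p.2]
              | some ls => dSet g p.1 (ls ++ [p.2])) g) g)
         (data.foldl (fun out d =>
            d.foldl (fun out p =>
              match dGet? out p.1 with
              | none => dSet out p.1 p.2
              | some old => dSet out p.1 ((p.2.zip old).map (fun x => x.1 + x.2))) out) out) := by
  induction data with
  | nil => exact fun g out h => h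
  | cons d data ih =>
      intro g out h
      exact ih _ _ (inner_fold d g out h)

-- ===== VERDICT (by name: the statement is the Claim_ definition above) =====
theorem merge_thread_output_spec : Claim_equal_merge_thread_output := by
  intro data _ _
  unfold Spec_merge_thread_output merge_thread_output merge_thread_output_alt
  obtain ⟨hmap, hne⟩ := outer_fold data [] [] ⟨rfl, by simp⟩
  rw [hmap]
  apply List.map_congr_left
  intro q hq
  have : redL q.2 = colSum q.2 := redL_eq_colSum q.2 (hne q hq)
  simp [colSum] at this
  simp [this]
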